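-- pv_equiv track=rewrite | github.com/daniel5426/talmudpedia | backend/app/services/published_app_bundle_storage.py | _normalize_asset_path
-- ===== SOURCE A (Python) =====
-- from typing import List, Optional, Tuple
--
-- class PublishedAppBundleStorageError(Exception):
--     pass
--
-- def _normalize_asset_path(asset_path: str) -> str:
--     raw = (asset_path or "").replace("\\", "/").strip()
--     if not raw:
--         raise PublishedAppBundleStorageError("Asset path is required")
--     if raw.startswith("/"):
--         raise PublishedAppBundleStorageError("Absolute asset paths are not allowed")
--
--     parts: List[str] = []
--     for part in raw.split("/"):
--         if not part or part == ".":
--             continue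
--         if part == "..":
--             raise PublishedAppBundleStorageError("Path traversal is not allowed")
--         parts.append(part)
--
--     normalized = "/".join(parts)
--     if not normalized:
--         raise PublishedAppBundleStorageError("Asset path is required")
--     return normalized
-- ===== SOURCE B (Python) =====
-- class PublishedAppBundleStorageError(Exception):
--     pass
--
-- def _normalize_asset_path(asset_path: str) -> str:
--     raw = (asset_path or "").replace("\\", "/").strip()
--     if not raw:
--         raise PublishedAppBundleStorageError("Asset path is required")
--     if raw.startswith("/"):
--         raise PublishedAppBundleStorageError("Absolute asset paths are not allowed")
--     # single character-level scan: build the normalized string directly,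
--     # emitting each completed segment at every '/' (and at the sentinel end '/')
--     out = ""
--     seg = ""
--     for ch in raw + "/":
--         if ch == "/":
--             if seg and seg != ".":
--                 if seg == "..":
--                     raise PublishedAppBundleStorageError("Path traversal is not allowed")
--                 out = seg if not out else out + "/" + seg
--             seg = ""
--         else:
--             seg += ch
--     if not out:
--         raise PublishedAppBundleStorageError("Asset path is required")
--     return out
-- ===== Notes on version B (the rewrite author's own statement) =====
-- stated objective: alternative
-- what changed: A splits the path into a list of segments, filters/validates them in a segment loop and joins them back; B never builds a segment list: a single character-level scan over raw + '/' maintains a current-segment buffer and emits the normalized string directly.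
import Mathlib
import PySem

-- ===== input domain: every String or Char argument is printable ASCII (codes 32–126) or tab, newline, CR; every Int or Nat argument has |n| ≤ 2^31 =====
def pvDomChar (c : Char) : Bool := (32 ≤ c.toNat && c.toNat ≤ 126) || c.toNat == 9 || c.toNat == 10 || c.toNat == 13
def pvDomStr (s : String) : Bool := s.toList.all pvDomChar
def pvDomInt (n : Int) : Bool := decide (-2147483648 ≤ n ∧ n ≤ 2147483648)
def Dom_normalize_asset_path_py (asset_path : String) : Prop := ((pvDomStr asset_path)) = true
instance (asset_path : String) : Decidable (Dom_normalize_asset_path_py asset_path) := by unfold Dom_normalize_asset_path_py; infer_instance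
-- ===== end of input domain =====

-- B replaces A's split-into-segments / filter-loop / join pipeline by a single
-- character-level scan that emits the normalized string directly (objective: alternative).
-- Raising paths of the Pythons return "" in the ports and are excluded by Pre_.

-- ===== PORT A =====
-- A's loop over raw.split("/"): none models the '..' raise, the accumulator is parts.
def normalize_asset_path_py_loop (l : List String) (acc : List String) : Option (List String) :=
  match l with
  | [] => some acc
  | p :: rest =>
    if p = "" ∨ p = "." then normalize_asset_path_py_loop rest acc
    else if p = ".." then none
    else normalize_asset_path_py_loop rest (acc ++ [p])

def normalize_asset_path_py (asset_path : String) : String :=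
  let raw := PySem.Str.strip (PySem.Str.replace asset_path "\\" "/")
  if raw = "" then ""  -- raise: Asset path is required
  else if PySem.Str.startswith raw "/" then ""  -- raise: absolute path
  else
    match normalize_asset_path_py_loop (((PySem.Str.split? raw "/").getD [])) [] with
    | none => ""  -- raise: path traversal
    | some parts =>
      let normalized := PySem.Str.join "/" parts
      if normalized = "" then "" else normalized

-- ===== PORT B =====
-- B's character scan over raw + "/": state (seg, out); none models the '..' raise.
def normalize_asset_path_py_alt_loop (cs : List Char) (seg : List Char) (out : List Char) :
    Option (List Char) :=
  match cs with
  | [] => some out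
  | c :: rest =>
    if c = '/' then
      if seg ≠ [] ∧ seg ≠ ['.'] then
        if seg = ['.', '.'] then none  -- raise: path traversal
        else normalize_asset_path_py_alt_loop rest []
          (if out = [] then seg else out ++ '/' :: seg)
      else normalize_asset_path_py_alt_loop rest [] out
    else normalize_asset_path_py_alt_loop rest (seg ++ [c]) out

def normalize_asset_path_py_alt (asset_path : String) : String :=
  let raw := PySem.Str.strip (PySem.Str.replace asset_path "\\" "/")
  if raw = "" then ""  -- raise: Asset path is required
  else if PySem.Str.startswith raw "/" then ""  -- raise: absolute path
  else
    match normalize_asset_path_py_alt_loop (raw.toList ++ ['/']) [] [] with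
    | none => ""  -- raise: path traversal
    | some out => if out = [] then "" else String.ofList out

-- ===== PRECONDITION & SPEC =====
-- Pre_ excludes exactly the inputs on which Python A raises: empty path after
-- normalization, absolute path, a '..' segment, or no meaningful segment at all.
def Pre_normalize_asset_path_py (asset_path : String) : Prop :=
  let raw := PySem.Str.strip (PySem.Str.replace asset_path "\\" "/")
  raw ≠ "" ∧ PySem.Str.startswith raw "/" = false ∧
  ".." ∉ (PySem.Str.split? raw "/").getD [] ∧
  ((PySem.Str.split? raw "/").getD []).filter (fun p => !(p == "" || p == ".")) ≠ []
instance (asset_path : String) : Decidable (Pre_normalize_asset_path_py asset_path) := by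
  unfold Pre_normalize_asset_path_py; infer_instance

def pvWitness_normalize_asset_path_py : String := "a/b.txt"

def Spec_normalize_asset_path_py (asset_path : String) (out : String) : Prop := out = normalize_asset_path_py_alt asset_path
instance (asset_path : String) (out : String) : Decidable (Spec_normalize_asset_path_py asset_path out) := by unfold Spec_normalize_asset_path_py; infer_instance

-- ===== CLAIM (what is proved, stated in full; the proofs are below) =====
def Claim_equal_normalize_asset_path_py : Prop := ∀ (asset_path : String), Dom_normalize_asset_path_py asset_path → Pre_normalize_asset_path_py asset_path → Spec_normalize_asset_path_py asset_path (normalize_asset_path_py asset_path)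

-- ===== LEMMAS AND PROOFS =====

-- Reference single-char splitter: splitSlash cs = the segments of cs between '/'s.
def splitSlash (cs : List Char) : List (List Char) :=
  match cs with
  | [] => [[]]
  | c :: rest =>
    if c = '/' then [] :: splitSlash rest
    else
      match splitSlash rest with
      | [] => [[c]]
      | h :: t => (c :: h) :: t

theorem splitSlash_ne_nil (cs : List Char) : splitSlash cs ≠ [] := by
  cases cs with
  | nil => simp [splitSlash]
  | cons c rest =>
    simp only [splitSlash]
    split_ifs
    · simp
    · rcases h : splitSlash rest with _ | ⟨h, t⟩ <;> simp

-- prepend onto the first element of a nonempty list of segments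
def headCons (pref : List Char) (l : List (List Char)) : List (List Char) :=
  match l with
  | [] => [pref]
  | h :: t => (pref ++ h) :: t

-- PySem's splitOn.go with enough fuel, sep = "/", is splitSlash (library internals,
-- not covered by a named PySem lemma).
theorem splitOnGo_eq (fuel : Nat) : ∀ (l cur : List Char) (acc : List (List Char)),
    l.length ≤ fuel →
    PySem.Chars.splitOn.go ['/'] fuel l cur acc =
      acc.reverse ++ headCons cur.reverse (splitSlash l) := by
  induction fuel with
  | zero =>
    intro l cur acc h
    have : l = [] := List.length_eq_zero_iff.mp (Nat.le_zero.mp h)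
    subst this
    simp [PySem.Chars.splitOn.go, splitSlash, headCons]
  | succ n ih =>
    intro l cur acc h
    cases l with
    | nil => simp [PySem.Chars.splitOn.go, splitSlash, headCons]
    | cons c rest =>
      simp only [List.length_cons, Nat.succ_le_succ_iff] at h
      by_cases hc : c = '/'
      · subst hc
        have hpre : List.isPrefixOf ['/'] ('/' :: rest) = true := by
          simp [List.isPrefixOf]
        simp only [PySem.Chars.splitOn.go, hpre, if_true, List.length_cons, List.length_nil,
          List.drop_succ_cons, List.drop_zero]
        rw [ih rest [] (cur.reverse :: acc) h]
        rcases hs : splitSlash rest with _ | ⟨hh, tt⟩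
        · exact absurd hs (splitSlash_ne_nil rest)
        · simp [splitSlash, hs, headCons]
      · have hpre : List.isPrefixOf ['/'] (c :: rest) = false := by
          simp [List.isPrefixOf]
          exact fun hcc => hc hcc.symm
        simp only [PySem.Chars.splitOn.go, hpre, Bool.false_eq_true, if_false]
        rw [ih rest (c :: cur) acc h]
        rcases hs : splitSlash rest with _ | ⟨hh, tt⟩
        · exact absurd hs (splitSlash_ne_nil rest)
        · simp [splitSlash, hs, hc, headCons]

theorem splitOn_slash_eq (cs : List Char) :
    PySem.Chars.splitOn cs ['/'] = splitSlash cs := by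
  have := splitOnGo_eq (cs.length + 1) cs [] [] (Nat.le_succ _)
  rw [show PySem.Chars.splitOn cs ['/'] = PySem.Chars.splitOn.go ['/'] (cs.length + 1) cs [] []
    from rfl, this]
  rcases hs : splitSlash cs with _ | ⟨h, t⟩
  · exact absurd hs (splitSlash_ne_nil cs)
  · simp [headCons]

-- B's char scan over cs ++ ['/'] processes exactly the slash-split segments,
-- the pending buffer seg prepended to the first one.
def segFold (L : List (List Char)) (out : List Char) : Option (List Char) :=
  match L with
  | [] => some out
  | s :: rest =>
    if s ≠ [] ∧ s ≠ ['.'] then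
      if s = ['.', '.'] then none
      else segFold rest (if out = [] then s else out ++ '/' :: s)
    else segFold rest out

theorem alt_loop_eq_segFold : ∀ (cs seg out : List Char),
    normalize_asset_path_py_alt_loop (cs ++ ['/']) seg out =
      segFold (headCons seg (splitSlash cs)) out := by
  intro cs
  induction cs with
  | nil =>
    intro seg out
    simp [normalize_asset_path_py_alt_loop, splitSlash, headCons, segFold]
  | cons c rest ih =>
    intro seg out
    by_cases hc : c = '/'
    · subst hc
      simp only [List.cons_append, normalize_asset_path_py_alt_loop]
      have htl : splitSlash ('/' :: rest) = [] :: splitSlash rest := by simp [splitSlash]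
      rw [htl]
      rcases hs : splitSlash rest with _ | ⟨hh, tt⟩
      · exact absurd hs (splitSlash_ne_nil rest)
      · by_cases hseg : seg ≠ [] ∧ seg ≠ ['.']
        · by_cases hdd : seg = ['.', '.']
          · simp [hdd, headCons, segFold]
          · simp [hseg, hdd, ih, hs, headCons, segFold]
        · simp [hseg, ih, hs, headCons, segFold]
    · simp only [List.cons_append, normalize_asset_path_py_alt_loop, if_neg hc, ih]

      have : splitSlash (c :: rest) =
          match splitSlash rest with
          | [] => [[c]]
          | h :: t => (c :: h) :: t := by simp [splitSlash, hc]
      rw [this]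
      rcases hs : splitSlash rest with _ | ⟨hh, tt⟩
      · exact absurd hs (splitSlash_ne_nil rest)
      · simp [headCons]

-- A's segment loop followed by join computes the same as segFold, provided no
-- '..' has been excluded yet and the accumulator holds the already-joined text.
theorem join_append_singleton (xs : List (List Char)) (h : List Char) (hne : xs ≠ []) :
    PySem.Chars.join ['/'] (xs ++ [h]) = PySem.Chars.join ['/'] xs ++ '/' :: h := by
  induction xs with
  | nil => exact absurd rfl hne
  | cons x xs ih =>
    cases xs with
    | nil => simp [PySem.Chars.join, List.intercalate]
    | cons y ys =>
      have hih := ih (by simp)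
      simp only [List.cons_append] at hih
      simp [PySem.Chars.join_cons_cons, hih]

theorem join_ne_nil (xs : List (List Char)) (hne : xs ≠ []) (hx : ∀ x ∈ xs, x ≠ []) :
    PySem.Chars.join ['/'] xs ≠ [] := by
  cases xs with
  | nil => exact absurd rfl hne
  | cons x xs =>
    cases xs with
    | nil =>
      simpa [PySem.Chars.join_singleton] using hx x (by simp)
    | cons y ys =>
      rw [PySem.Chars.join_cons_cons]
      have : x ≠ [] := hx x (by simp)
      cases x with
      | nil => exact absurd rfl this
      | cons a as => simp

theorem loop_eq_segFold : ∀ (L accL : List (List Char)),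
    (∀ x ∈ accL, x ≠ []) →
    (normalize_asset_path_py_loop (L.map String.ofList) (accL.map String.ofList)).map
        (fun parts => (PySem.Str.join "/" parts).toList) =
      segFold L (PySem.Chars.join ['/'] accL) := by
  intro L
  induction L with
  | nil =>
    intro accL hacc
    simp [normalize_asset_path_py_loop, segFold, PySem.Str.join, Function.comp_def,
      String.toList_ofList]
  | cons s rest ih =>
    intro accL hacc
    simp only [List.map_cons, normalize_asset_path_py_loop, segFold]
    have hofl : ∀ (t : List Char), (String.ofList s = String.ofList t) ↔ s = t := by
      intro t
      constructor
      · intro h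
        have := congrArg String.toList h
        simp at this
        exact this
      · intro h; rw [h]
    have hempty : (String.ofList s = "") ↔ s = [] := by
      simp [hofl []]
    have hdot : (String.ofList s = ".") ↔ s = ['.'] := by
      simpa using hofl ['.']
    have hdd : (String.ofList s = "..") ↔ s = ['.', '.'] := by
      simpa using hofl ['.', '.']
    by_cases h1 : s = [] ∨ s = ['.']
    · have : ¬ (s ≠ [] ∧ s ≠ ['.']) := by tauto
      rw [if_pos (by rw [hempty, hdot]; exact h1), if_neg this]
      exact ih accL hacc
    · have hne : s ≠ [] ∧ s ≠ ['.'] := by tauto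
      rw [if_neg (by rw [hempty, hdot]; exact h1), if_pos hne]
      by_cases h2 : s = ['.', '.']
      · rw [if_pos (hdd.mpr h2), if_pos h2]
        simp
      · rw [if_neg (fun h => h2 (hdd.mp h)), if_neg h2]
        rw [show accL.map String.ofList ++ [String.ofList s] = (accL ++ [s]).map String.ofList
          by simp]
        rw [ih (accL ++ [s]) (by intro x hx; rcases List.mem_append.mp hx with h | h
                                 · exact hacc x h
                                 · simp at h; subst h; exact hne.1)]
        congr 1
        by_cases haccnil : accL = []
        · subst haccnil
          simp [PySem.Chars.join, List.intercalate]
        · rw [join_append_singleton accL s haccnil,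
            if_neg (join_ne_nil accL haccnil hacc)]

-- Assembly: both ports, past the shared guards, compute segFold over the same segments.
theorem normalize_asset_path_py_branch_eq (raw : String) (h1 : raw ≠ "")
    (h2 : PySem.Str.startswith raw "/" = false) :
    (if raw = "" then ""
     else if PySem.Str.startswith raw "/" then ""
     else
       match normalize_asset_path_py_loop ((PySem.Str.split? raw "/").getD []) [] with
       | none => ""
       | some parts =>
         let normalized := PySem.Str.join "/" parts
         if normalized = "" then "" else normalized)
    = (if raw = "" then ""
       else if PySem.Str.startswith raw "/" then ""
       else
         match normalize_asset_path_py_alt_loop (raw.toList ++ ['/']) [] [] with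
         | none => ""
         | some out => if out = [] then "" else String.ofList out) := by
  rw [if_neg h1, if_neg h1, h2]
  simp only [Bool.false_eq_true, if_false]
  have hslash : ("/" : String).toList = ['/'] := rfl
  have hsplit : (PySem.Str.split? raw "/").getD [] =
      (splitSlash raw.toList).map String.ofList := by
    simp [PySem.Str.split?, PySem.Chars.split?, hslash, splitOn_slash_eq]
  have hA : (normalize_asset_path_py_loop ((splitSlash raw.toList).map String.ofList)
        (([] : List (List Char)).map String.ofList)).map
        (fun parts => (PySem.Str.join "/" parts).toList) =
      segFold (splitSlash raw.toList) [] := by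
    rw [loop_eq_segFold (splitSlash raw.toList) [] (by simp)]
    rw [PySem.Chars.join_nil]
  have hB : normalize_asset_path_py_alt_loop (raw.toList ++ ['/']) [] [] =
      segFold (splitSlash raw.toList) [] := by
    rw [alt_loop_eq_segFold raw.toList [] []]
    rcases hs : splitSlash raw.toList with _ | ⟨hh, tt⟩
    · exact absurd hs (splitSlash_ne_nil raw.toList)
    · simp [headCons]
  rw [hsplit, hB]
  simp only [List.map_nil] at hA
  rcases hseg : segFold (splitSlash raw.toList) [] with _ | out
  · rw [hseg] at hA
    rcases hl : normalize_asset_path_py_loop ((splitSlash raw.toList).map String.ofList) []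
        with _ | parts
    · rfl
    · rw [hl] at hA; simp at hA
  · rw [hseg] at hA
    rcases hl : normalize_asset_path_py_loop ((splitSlash raw.toList).map String.ofList) []
        with _ | parts
    · rw [hl] at hA; simp at hA
    · rw [hl] at hA
      simp only [Option.map_some, Option.some.injEq] at hA
      simp only []
      by_cases hj : PySem.Str.join "/" parts = ""
      · rw [if_pos hj]
        rw [if_pos (by rw [← hA, String.toList_eq_nil_iff]; exact hj)]
      · rw [if_neg hj]
        rw [if_neg (by rw [← hA]; intro h
                       exact hj (String.toList_eq_nil_iff.mp h))]
        rw [← hA, String.ofList_toList]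

-- ===== VERDICT (by name: the statement is the Claim_ definition above) =====
theorem normalize_asset_path_py_spec : Claim_equal_normalize_asset_path_py := by
  intro s _ hpre
  obtain ⟨h1, h2, _h3, _h4⟩ := hpre
  unfold Spec_normalize_asset_path_py normalize_asset_path_py normalize_asset_path_py_alt
  exact normalize_asset_path_py_branch_eq _ h1 h2
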